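-- pv_equiv track=rewrite | github.com/gurujbc/footbag-platform | legacy_data/pipeline/build_workbook_community.py | build_placement_stats
-- ===== SOURCE A (Python) =====
-- from collections import Counter, defaultdict
--
-- def build_placement_stats(
--     pf_rows: list[dict],
-- ) -> dict[str, dict]:
--     """
--     Returns {person_id: {events, wins, podiums, placements, year_first, year_last}}
--     Counts are across ALL division categories.
--     """
--     stats: dict[str, dict] = defaultdict(lambda: {
--         "events": set(), "wins": 0, "podiums": 0,
--         "placements": 0, "years": set(),
--     })
--
--     for row in pf_rows:
--         pid = row.get("person_id", "")
--         if not pid or pid == "__NON_PERSON__":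
--             continue
--         eid  = row.get("event_id", "")
--         year = row.get("year", "")
--         try:
--             place = int(row.get("place", 0) or 0)
--         except ValueError:
--             place = 0
--
--         s = stats[pid]
--         if eid:
--             s["events"].add(eid)
--         if year:
--             try:
--                 s["years"].add(int(year))
--             except ValueError:
--                 pass
--         s["placements"] += 1
--         if place == 1:
--             s["wins"] += 1
--         if 1 <= place <= 3:
--             s["podiums"] += 1
--
--     return {
--         pid: {
--             "events":     len(d["events"]),
--             "wins":       d["wins"],
--             "podiums":    d["podiums"],
--             "placements": d["placements"],
--             "year_first": min(d["years"]) if d["years"] else None,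
--             "year_last":  max(d["years"]) if d["years"] else None,
--         }
--         for pid, d in stats.items()
--     }
-- ===== SOURCE B (Python) =====
-- from collections import defaultdict
--
--
-- def build_placement_stats(
--     pf_rows: list[dict],
-- ) -> dict[str, dict]:
--     # Pass 1: group the valid rows by person_id (first-occurrence order).
--     groups: dict[str, list] = defaultdict(list)
--     for row in pf_rows:
--         pid = row.get("person_id", "")
--         if pid and pid != "__NON_PERSON__":
--             groups[pid].append(row)
--
--     # Pass 2: summarize each person's rows.
--     out: dict[str, dict] = {}
--     for pid, rows in groups.items():
--         events = {r.get("event_id", "") for r in rows if r.get("event_id", "")}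
--         years = set()
--         for r in rows:
--             y = r.get("year", "")
--             if y:
--                 try:
--                     years.add(int(y))
--                 except ValueError:
--                     pass
--         wins = 0
--         podiums = 0
--         for r in rows:
--             try:
--                 place = int(r.get("place", 0) or 0)
--             except ValueError:
--                 place = 0
--             if place == 1:
--                 wins += 1
--             if 1 <= place <= 3:
--                 podiums += 1
--         out[pid] = {
--             "events": len(events),
--             "wins": wins,
--             "podiums": podiums,
--             "placements": len(rows),
--             "year_first": min(years) if years else None,
--             "year_last": max(years) if years else None,
--         }
--     return out
-- ===== Notes on version B (the rewrite author's own statement) =====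
-- stated objective: alternative
-- what changed: Replaces A's single pass that interleaves all five counters inside one mutable defaultdict record with a group-then-summarize decomposition: one pass groups valid rows per person, then each group is summarized independently (placements = len(rows), wins/podiums by a scan over the group, events/years as set builders).
import Mathlib
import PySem

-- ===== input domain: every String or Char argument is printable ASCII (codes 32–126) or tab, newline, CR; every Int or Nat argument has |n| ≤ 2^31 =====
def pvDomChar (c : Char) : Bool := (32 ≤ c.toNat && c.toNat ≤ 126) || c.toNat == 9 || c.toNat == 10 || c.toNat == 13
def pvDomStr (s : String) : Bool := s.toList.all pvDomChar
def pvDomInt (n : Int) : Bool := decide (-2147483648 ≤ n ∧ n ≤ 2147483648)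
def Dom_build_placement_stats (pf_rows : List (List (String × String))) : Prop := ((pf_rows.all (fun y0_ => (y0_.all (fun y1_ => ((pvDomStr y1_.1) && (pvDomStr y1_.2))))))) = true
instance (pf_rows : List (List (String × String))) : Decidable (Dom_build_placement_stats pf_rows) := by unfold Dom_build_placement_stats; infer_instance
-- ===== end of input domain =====

-- B replaces A's single pass with interleaved per-person counters by a group-rows-per-person
-- pass followed by an independent summary of each group (alternative decomposition, same cost).

-- row.get(k, "") on a Python dict row
def rget (row : List (String × String)) (k : String) : String :=
  (PySem.Dict.mk row).getD k ""

-- int(row.get("place", 0) or 0), ValueError -> 0 (shared literal code of both Pythons)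
def parsePlace (row : List (String × String)) : Int :=
  let s := rget row "place"
  if s = "" then 0 else (PySem.Int.ofStr? s).getD 0

-- the years-set loop body, literally identical in both Pythons
def yrStep (ys : PySem.Set Int) (r : List (String × String)) : PySem.Set Int :=
  let y := rget r "year"
  if y ≠ "" then
    match PySem.Int.ofStr? y with
    | some n => ys.add n
    | none => ys
  else ys

-- ===== PORT A =====
structure StA where
  events : PySem.Set String
  wins : Int
  podiums : Int
  placements : Int
  years : PySem.Set Int
deriving DecidableEq, Repr

def initStA : StA := ⟨[], 0, 0, 0, []⟩

def stepA (s : StA) (row : List (String × String)) : StA :=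
  let eid := rget row "event_id"
  let year := rget row "year"
  let place := parsePlace row
  let s1 := if eid ≠ "" then { s with events := s.events.add eid } else s
  let s2 := if year ≠ "" then
      match PySem.Int.ofStr? year with
      | some y => { s1 with years := s1.years.add y }
      | none => s1
    else s1
  let s3 := { s2 with placements := s2.placements + 1 }
  let s4 := if place = 1 then { s3 with wins := s3.wins + 1 } else s3
  if 1 ≤ place ∧ place ≤ 3 then { s4 with podiums := s4.podiums + 1 } else s4

def emitA (d : StA) : List (String × Option Int) :=
  [("events", some (PySem.Set.len d.events)),
   ("wins", some d.wins),
   ("podiums", some d.podiums),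
   ("placements", some d.placements),
   ("year_first", PySem.List.min? d.years (fun y => y)),
   ("year_last", PySem.List.max? d.years (fun y => y))]

def build_placement_stats (pf_rows : List (List (String × String))) : List (String × List (String × Option Int)) :=
  let stats := pf_rows.foldl (fun d row =>
    let pid := rget row "person_id"
    if pid = "" ∨ pid = "__NON_PERSON__" then d
    else d.modify pid initStA (fun s => stepA s row)) PySem.Dict.empty
  stats.items.map (fun p => (p.1, emitA p.2))

-- ===== PORT B =====
def summarizeB (rows : List (List (String × String))) : List (String × Option Int) :=
  let events := PySem.Set.ofList
    ((rows.filter (fun r => rget r "event_id" ≠ "")).map (fun r => rget r "event_id"))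
  let years := rows.foldl yrStep ([] : PySem.Set Int)
  let wp := rows.foldl (fun (wp : Int × Int) r =>
      let place := parsePlace r
      ((if place = 1 then wp.1 + 1 else wp.1),
       (if 1 ≤ place ∧ place ≤ 3 then wp.2 + 1 else wp.2))) ((0 : Int), (0 : Int))
  [("events", some (PySem.Set.len events)),
   ("wins", some wp.1),
   ("podiums", some wp.2),
   ("placements", some (rows.length : Int)),
   ("year_first", PySem.List.min? years (fun y => y)),
   ("year_last", PySem.List.max? years (fun y => y))]

def build_placement_stats_alt (pf_rows : List (List (String × String))) : List (String × List (String × Option Int)) :=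
  let groups := pf_rows.foldl (fun g row =>
    let pid := rget row "person_id"
    if pid ≠ "" ∧ pid ≠ "__NON_PERSON__" then g.modify pid [] (fun rs => rs ++ [row])
    else g) PySem.Dict.empty
  groups.items.map (fun p => (p.1, summarizeB p.2))

-- ===== PRECONDITION & SPEC =====
def Spec_build_placement_stats (pf_rows : List (List (String × String))) (out : List (String × List (String × Option Int))) : Prop := out = build_placement_stats_alt pf_rows
instance (pf_rows : List (List (String × String))) (out : List (String × List (String × Option Int))) : Decidable (Spec_build_placement_stats pf_rows out) := by unfold Spec_build_placement_stats; infer_instance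

-- ===== CLAIM (what is proved, stated in full; the proofs are below) =====
def Claim_equal_build_placement_stats : Prop := ∀ (pf_rows : List (List (String × String))), Dom_build_placement_stats pf_rows → Spec_build_placement_stats pf_rows (build_placement_stats pf_rows)

-- ===== LEMMAS AND PROOFS =====

-- fold over one group of rows: the accumulated StA, componentwise
def evStep (es : PySem.Set String) (r : List (String × String)) : PySem.Set String :=
  if rget r "event_id" ≠ "" then es.add (rget r "event_id") else es

def wStep (w : Int) (r : List (String × String)) : Int :=
  if parsePlace r = 1 then w + 1 else w

def pStep (p : Int) (r : List (String × String)) : Int :=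
  if 1 ≤ parsePlace r ∧ parsePlace r ≤ 3 then p + 1 else p

theorem stepA_eq (s : StA) (r : List (String × String)) :
    stepA s r = ⟨evStep s.events r, wStep s.wins r, pStep s.podiums r, s.placements + 1, yrStep s.years r⟩ := by
  simp only [stepA, evStep, wStep, pStep, yrStep]
  split_ifs <;> cases h : PySem.Int.ofStr? (rget r "year") <;> simp_all

theorem foldl_stepA (rows : List (List (String × String))) (s : StA) :
    rows.foldl stepA s =
      ⟨rows.foldl evStep s.events, rows.foldl wStep s.wins, rows.foldl pStep s.podiums,
       s.placements + rows.length, rows.foldl yrStep s.years⟩ := by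
  induction rows generalizing s with
  | nil => simp
  | cons r t ih =>
    simp only [List.foldl_cons, stepA_eq, ih, List.length_cons]
    congr 1
    omega

def hGrp (rows : List (List (String × String))) : StA := rows.foldl stepA initStA

def mapD (d : PySem.Dict String (List (List (String × String)))) : PySem.Dict String StA :=
  PySem.Dict.mk (d.items.map (fun p => (p.1, hGrp p.2)))

theorem contains_mapD (d : PySem.Dict String (List (List (String × String)))) (k : String) :
    (mapD d).contains k = d.contains k := by
  simp only [mapD, PySem.Dict.contains, List.any_map]
  rfl

theorem getD_mapD (d : PySem.Dict String (List (List (String × String)))) (k : String) :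
    (mapD d).getD k initStA = hGrp (d.getD k []) := by
  simp only [mapD, PySem.Dict.getD, PySem.Dict.get?, List.find?_map]
  have hp : ((fun p : String × StA => p.1 == k) ∘ fun p : String × List (List (String × String)) => (p.1, hGrp p.2)) = fun p => p.1 == k := rfl
  rw [hp]
  cases d.items.find? (fun p => p.1 == k) <;> rfl

theorem insert_mapD (d : PySem.Dict String (List (List (String × String)))) (k : String)
    (v : List (List (String × String))) :
    (mapD d).insert k (hGrp v) = mapD (d.insert k v) := by
  simp only [PySem.Dict.insert, contains_mapD]
  split_ifs with h
  · unfold mapD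
    congr 1
    simp only [List.map_map]
    apply List.map_congr_left
    intro p _
    by_cases hp : p.1 = k <;> simp [hp]
  · unfold mapD
    congr 1
    simp [List.map_append]

theorem modify_mapD (d : PySem.Dict String (List (List (String × String)))) (k : String)
    (x : List (String × String)) :
    (mapD d).modify k initStA (fun s => stepA s x) = mapD (d.modify k [] (fun rs => rs ++ [x])) := by
  have h1 : stepA ((mapD d).getD k initStA) x = hGrp (d.getD k [] ++ [x]) := by
    rw [getD_mapD]; simp [hGrp, List.foldl_append]
  simp only [PySem.Dict.modify, h1]
  exact insert_mapD d k (d.getD k [] ++ [x])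

theorem foldl_commute (l : List (List (String × String)))
    (d : PySem.Dict String (List (List (String × String)))) :
    l.foldl (fun d row => d.modify (rget row "person_id") initStA (fun s => stepA s row)) (mapD d)
      = mapD (l.foldl (fun g row => g.modify (rget row "person_id") [] (fun rs => rs ++ [row])) d) := by
  induction l generalizing d with
  | nil => rfl
  | cons x t ih => simp only [List.foldl_cons, modify_mapD, ih]

theorem emit_summarize (rows : List (List (String × String))) :
    emitA (hGrp rows) = summarizeB rows := by
  unfold emitA summarizeB hGrp
  rw [foldl_stepA]
  have hev : rows.foldl evStep ([] : PySem.Set String) =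
      PySem.Set.ofList ((rows.filter (fun r => rget r "event_id" ≠ "")).map (fun r => rget r "event_id")) := by
    have h1 : rows.foldl evStep ([] : PySem.Set String) =
        rows.foldl (fun es r => if rget r "event_id" ≠ "" then PySem.Set.add es (rget r "event_id") else es) [] := rfl
    rw [h1, PySem.List.foldl_ite_eq_foldl_filter (p := fun r => rget r "event_id" ≠ "")
      (f := fun es r => PySem.Set.add es (rget r "event_id")), ← PySem.Set.update_map_eq_foldl_add,
      PySem.Set.update_nil_left]
  have hwp : (fun (wp : Int × Int) r =>
      let place := parsePlace r
      ((if place = 1 then wp.1 + 1 else wp.1),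
       (if 1 ≤ place ∧ place ≤ 3 then wp.2 + 1 else wp.2))) =
      fun (wp : Int × Int) r => (wStep wp.1 r, pStep wp.2 r) := by
    funext wp r
    simp [wStep, pStep]
  rw [hwp, PySem.List.foldl_prod_mk]
  simp [initStA, hev]

-- ===== VERDICT (by name: the statement is the Claim_ definition above) =====
theorem build_placement_stats_spec : Claim_equal_build_placement_stats := by
  intro pf_rows _
  unfold Spec_build_placement_stats build_placement_stats build_placement_stats_alt
  have hA : (fun (d : PySem.Dict String StA) row =>
      let pid := rget row "person_id"
      if pid = "" ∨ pid = "__NON_PERSON__" then d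
      else d.modify pid initStA (fun s => stepA s row)) =
      fun d row => if rget row "person_id" ≠ "" ∧ rget row "person_id" ≠ "__NON_PERSON__"
        then d.modify (rget row "person_id") initStA (fun s => stepA s row) else d := by
    funext d row
    by_cases h1 : rget row "person_id" = ""
    · simp [h1]
    · by_cases h2 : rget row "person_id" = "__NON_PERSON__" <;> simp [h1, h2]
  have hB : (fun (g : PySem.Dict String (List (List (String × String)))) row =>
      let pid := rget row "person_id"
      if pid ≠ "" ∧ pid ≠ "__NON_PERSON__" then g.modify pid [] (fun rs => rs ++ [row])
      else g) =
      fun g row => if rget row "person_id" ≠ "" ∧ rget row "person_id" ≠ "__NON_PERSON__"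
        then g.modify (rget row "person_id") [] (fun rs => rs ++ [row]) else g := rfl
  rw [hA, hB, PySem.List.foldl_ite_eq_foldl_filter
      (p := fun row => rget row "person_id" ≠ "" ∧ rget row "person_id" ≠ "__NON_PERSON__")
      (f := fun (d : PySem.Dict String StA) row => d.modify (rget row "person_id") initStA (fun s => stepA s row)),
    PySem.List.foldl_ite_eq_foldl_filter
      (p := fun row => rget row "person_id" ≠ "" ∧ rget row "person_id" ≠ "__NON_PERSON__")
      (f := fun (g : PySem.Dict String (List (List (String × String)))) row => g.modify (rget row "person_id") [] (fun rs => rs ++ [row]))]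
  rw [show (PySem.Dict.empty : PySem.Dict String StA) = mapD PySem.Dict.empty from rfl, foldl_commute]
  simp only [mapD, List.map_map]
  apply List.map_congr_left
  intro p _
  simp [Function.comp, emit_summarize]
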